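-- pv_equiv track=rewrite | github.com/christopherekfeldt/mcp-bitbucket-dc | src/mcp_bitbucket_dc/formatting.py | _extract_context_blocks
-- ===== SOURCE A (Python) =====
-- from typing import Any, Optional
--
-- def _extract_context_blocks(
--     hit_contexts: list[list[dict[str, Any]]],
-- ) -> list[list[dict[str, Any]]]:
--     """Group all hit contexts into displayable blocks of consecutive lines."""
--     all_contexts = []
--     for group in hit_contexts:
--         all_contexts.extend(group)
--
--     if not all_contexts:
--         return []
--
--     # Sort by line number
--     sorted_ctx = sorted(all_contexts, key=lambda c: c.get("line", 0))
--
--     blocks: list[list[dict[str, Any]]] = []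
--     current: list[dict[str, Any]] = [sorted_ctx[0]]
--
--     for ctx in sorted_ctx[1:]:
--         if ctx.get("line", 0) - current[-1].get("line", 0) <= 3:
--             current.append(ctx)
--         else:
--             blocks.append(current)
--             current = [ctx]
--     blocks.append(current)
--     return blocks
-- ===== SOURCE B (Python) =====
-- def _run(prev, rest):
--     """Number of leading contexts of rest that continue a block ending at line prev."""
--     k = 0
--     for ctx in rest:
--         line = ctx.get("line", 0)
--         if line - prev > 3:
--             break
--         prev = line
--         k += 1
--     return k
--
--
-- def _extract_context_blocks(hit_contexts):
--     """Group all hit contexts into displayable blocks of consecutive lines."""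
--     s = sorted([c for g in hit_contexts for c in g], key=lambda c: c.get("line", 0))
--     blocks = []
--     while s:
--         k = 1 + _run(s[0].get("line", 0), s[1:])
--         blocks.append(s[:k])
--         s = s[k:]
--     return blocks
-- ===== Notes on version B (the rewrite author's own statement) =====
-- stated objective: alternative
-- what changed: Replaces A's fold that grows a running 'current' block inside a (blocks,current) accumulator with a run-length computation: B repeatedly measures the length of the next run of gap<=3 lines and slices that whole block off the sorted list; flatten and stable sort are kept.
import Mathlib
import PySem

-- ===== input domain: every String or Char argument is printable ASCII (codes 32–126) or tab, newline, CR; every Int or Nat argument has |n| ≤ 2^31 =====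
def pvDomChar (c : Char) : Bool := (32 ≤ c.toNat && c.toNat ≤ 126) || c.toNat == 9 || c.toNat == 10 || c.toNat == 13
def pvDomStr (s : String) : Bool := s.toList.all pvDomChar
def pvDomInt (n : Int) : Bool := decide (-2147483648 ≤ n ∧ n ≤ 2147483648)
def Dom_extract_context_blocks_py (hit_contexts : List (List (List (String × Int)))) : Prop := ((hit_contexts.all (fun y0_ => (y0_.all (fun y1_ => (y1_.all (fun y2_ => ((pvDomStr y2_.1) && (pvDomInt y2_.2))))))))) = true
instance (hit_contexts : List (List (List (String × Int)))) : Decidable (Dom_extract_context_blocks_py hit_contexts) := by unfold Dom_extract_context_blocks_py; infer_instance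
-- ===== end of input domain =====

-- B replaces A's running-'current' accumulator fold with run-length measurement and block slicing (objective: alternative decomposition, same cost).

-- shared helper: c.get("line", 0) on the dict c
def pvLine (c : List (String × Int)) : Int := PySem.Dict.getD (PySem.Dict.mk c) "line" 0

-- ===== PORT A =====
def extract_context_blocks_py (hit_contexts : List (List (List (String × Int)))) : List (List (List (String × Int))) :=
  let all_contexts := hit_contexts.foldl (fun acc group => acc ++ group) []
  if all_contexts = [] then []
  else
    let sorted_ctx := PySem.List.sorted all_contexts (fun c => pvLine c) false
    match sorted_ctx with
    | [] => []  -- unreachable: all_contexts ≠ []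
    | c0 :: rest =>
      let p := rest.foldl
        (fun (st : List (List (List (String × Int))) × List (List (String × Int))) ctx =>
          if pvLine ctx - pvLine ((PySem.List.pyGet? st.2 (-1)).getD []) ≤ 3 then
            (st.1, st.2 ++ [ctx])
          else
            (st.1 ++ [st.2], [ctx]))
        ([], [c0])
      p.1 ++ [p.2]

-- ===== PORT B =====
-- _run(prev, rest): for-loop with break, as structural recursion on rest
def pvRunB (prev : Int) (rest : List (List (String × Int))) : Nat :=
  match rest with
  | [] => 0
  | ctx :: cs =>
    let line := pvLine ctx
    if line - prev > 3 then 0 else 1 + pvRunB line cs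

-- the 'while s:' loop, carrying the 'blocks' accumulator
def pvBlocksLoop (blocks : List (List (List (String × Int)))) (s : List (List (String × Int))) : List (List (List (String × Int))) :=
  match h : s with
  | [] => blocks
  | c :: cs =>
    let k : Nat := 1 + pvRunB (pvLine c) cs
    pvBlocksLoop (blocks ++ [PySem.List.slice s none (some (k : Int))]) (PySem.List.slice s (some (k : Int)) none)
termination_by s.length
decreasing_by
  subst h
  rw [PySem.List.slice_from_natCast]
  simp

def extract_context_blocks_py_alt (hit_contexts : List (List (List (String × Int)))) : List (List (List (String × Int))) :=
  let s := PySem.List.sorted (hit_contexts.flatMap (fun g => g)) (fun c => pvLine c) false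
  pvBlocksLoop [] s

-- ===== PRECONDITION & SPEC =====
def Spec_extract_context_blocks_py (hit_contexts : List (List (List (String × Int)))) (out : List (List (List (String × Int)))) : Prop := out = extract_context_blocks_py_alt hit_contexts
instance (hit_contexts : List (List (List (String × Int)))) (out : List (List (List (String × Int)))) : Decidable (Spec_extract_context_blocks_py hit_contexts out) := by unfold Spec_extract_context_blocks_py; infer_instance

-- ===== CLAIM (what is proved, stated in full; the proofs are below) =====
def Claim_equal_extract_context_blocks_py : Prop := ∀ (hit_contexts : List (List (List (String × Int)))), Dom_extract_context_blocks_py hit_contexts → Spec_extract_context_blocks_py hit_contexts (extract_context_blocks_py hit_contexts)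

-- ===== LEMMAS AND PROOFS =====

-- line of the last element of a nonempty block, as A's port writes it
def pvLastLine (cur : List (List (String × Int))) : Int :=
  pvLine ((PySem.List.pyGet? cur (-1)).getD [])

-- common reference: A's grouping loop as a structural recursion on the remaining list
def pvGLoop (cur : List (List (String × Int))) (rest : List (List (String × Int))) : List (List (List (String × Int))) :=
  match rest with
  | [] => [cur]
  | x :: xs =>
    if pvLine x - pvLastLine cur ≤ 3 then pvGLoop (cur ++ [x]) xs
    else cur :: pvGLoop [x] xs

theorem pvFoldl_eq_gLoop (rest : List (List (String × Int))) :
    ∀ (blocks : List (List (List (String × Int)))) (cur : List (List (String × Int))),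
    (rest.foldl
        (fun (st : List (List (List (String × Int))) × List (List (String × Int))) ctx =>
          if pvLine ctx - pvLine ((PySem.List.pyGet? st.2 (-1)).getD []) ≤ 3 then
            (st.1, st.2 ++ [ctx])
          else
            (st.1 ++ [st.2], [ctx]))
        (blocks, cur)).1 ++
      [(rest.foldl
        (fun (st : List (List (List (String × Int))) × List (List (String × Int))) ctx =>
          if pvLine ctx - pvLine ((PySem.List.pyGet? st.2 (-1)).getD []) ≤ 3 then
            (st.1, st.2 ++ [ctx])
          else
            (st.1 ++ [st.2], [ctx]))
        (blocks, cur)).2] = blocks ++ pvGLoop cur rest := by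
  induction rest with
  | nil => intro blocks cur; simp [pvGLoop]
  | cons x xs ih =>
    intro blocks cur
    simp only [List.foldl_cons, pvGLoop, pvLastLine]
    by_cases h : pvLine x - pvLine ((PySem.List.pyGet? cur (-1)).getD []) ≤ 3
    · simp only [h, if_pos]
      exact ih blocks (cur ++ [x])
    · simp only [h, if_neg, not_false_iff]
      rw [ih (blocks ++ [cur]) [x]]
      simp

theorem pvBlocksLoop_nil (blocks : List (List (List (String × Int)))) :
    pvBlocksLoop blocks [] = blocks := by
  unfold pvBlocksLoop
  rfl

theorem pvBlocksLoop_cons (blocks : List (List (List (String × Int))))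
    (c : List (String × Int)) (cs : List (List (String × Int))) :
    pvBlocksLoop blocks (c :: cs) =
      pvBlocksLoop (blocks ++ [c :: cs.take (pvRunB (pvLine c) cs)]) (cs.drop (pvRunB (pvLine c) cs)) := by
  conv_lhs => unfold pvBlocksLoop
  dsimp only
  rw [PySem.List.slice_from_natCast, PySem.List.slice_to_natCast]
  simp [Nat.add_comm 1]

theorem pvBlocksLoop_acc_aux (n : Nat) :
    ∀ (s : List (List (String × Int))), s.length ≤ n →
    ∀ (blocks : List (List (List (String × Int)))),
    pvBlocksLoop blocks s = blocks ++ pvBlocksLoop [] s := by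
  induction n with
  | zero =>
    intro s hs blocks
    have : s = [] := List.length_eq_zero_iff.mp (Nat.le_zero.mp hs)
    subst this
    simp [pvBlocksLoop_nil]
  | succ n ih =>
    intro s hs blocks
    match s with
    | [] => simp [pvBlocksLoop_nil]
    | c :: cs =>
      rw [pvBlocksLoop_cons, pvBlocksLoop_cons [] c cs]
      have hlen : (cs.drop (pvRunB (pvLine c) cs)).length ≤ n := by
        simp [List.length_drop] at hs ⊢
        omega
      rw [ih _ hlen, ih _ hlen ([] ++ [c :: cs.take (pvRunB (pvLine c) cs)])]
      simp

theorem pvBlocksLoop_acc (s : List (List (String × Int))) (blocks : List (List (List (String × Int)))) :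
    pvBlocksLoop blocks s = blocks ++ pvBlocksLoop [] s :=
  pvBlocksLoop_acc_aux s.length s le_rfl blocks

theorem pvLastLine_append (cur : List (List (String × Int))) (x : List (String × Int)) :
    pvLastLine (cur ++ [x]) = pvLine x := by
  simp [pvLastLine, PySem.List.pyGet?_neg_one_append_singleton]

theorem pvLastLine_singleton (x : List (String × Int)) : pvLastLine [x] = pvLine x := by
  simp [pvLastLine, PySem.List.pyGet?_neg_one]

theorem pvGLoop_eq_blocks (rest : List (List (String × Int))) :
    ∀ (cur : List (List (String × Int))),
    pvGLoop cur rest =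
      (cur ++ rest.take (pvRunB (pvLastLine cur) rest)) ::
        pvBlocksLoop [] (rest.drop (pvRunB (pvLastLine cur) rest)) := by
  induction rest with
  | nil => intro cur; simp [pvGLoop, pvRunB, pvBlocksLoop_nil]
  | cons x xs ih =>
    intro cur
    by_cases h : pvLine x - pvLastLine cur ≤ 3
    · have hr : pvRunB (pvLastLine cur) (x :: xs) = 1 + pvRunB (pvLine x) xs := by
        simp only [pvRunB]; rw [if_neg]; omega
      rw [pvGLoop, if_pos h, ih (cur ++ [x]), pvLastLine_append, hr]
      simp [Nat.add_comm 1]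
    · have hr : pvRunB (pvLastLine cur) (x :: xs) = 0 := by
        simp only [pvRunB]; rw [if_pos]; omega
      rw [pvGLoop, if_neg h, hr]
      simp only [List.take_zero, List.drop_zero, List.append_nil]
      congr 1
      rw [ih [x], pvLastLine_singleton, pvBlocksLoop_cons]
      conv_rhs => rw [pvBlocksLoop_acc]
      simp

-- ===== VERDICT (by name: the statement is the Claim_ definition above) =====
theorem extract_context_blocks_py_spec : Claim_equal_extract_context_blocks_py := by
  intro hc _
  unfold Spec_extract_context_blocks_py extract_context_blocks_py extract_context_blocks_py_alt
  have hflat : hc.foldl (fun acc group => acc ++ group) [] = hc.flatten := by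
    simpa using PySem.List.foldl_append_eq_flatten hc []
  have hfm : hc.flatMap (fun g => g) = hc.flatten := by simp
  simp only [hflat, hfm]
  by_cases h : hc.flatten = []
  · rw [if_pos h, h]
    have hsn : PySem.List.sorted ([] : List (List (String × Int))) (fun c => pvLine c) false = [] := by
      simp [PySem.List.sorted_eq_nil_iff]
    rw [hsn, pvBlocksLoop_nil]
  · rw [if_neg h]
    have hs : PySem.List.sorted hc.flatten (fun c => pvLine c) false ≠ [] := by
      simpa [PySem.List.sorted_eq_nil_iff] using h
    obtain ⟨c0, rest, heq⟩ := List.exists_cons_of_ne_nil hs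
    rw [heq]
    dsimp only
    rw [pvFoldl_eq_gLoop rest [] [c0], List.nil_append]
    rw [pvGLoop_eq_blocks rest [c0], pvLastLine_singleton, pvBlocksLoop_cons]
    conv_rhs => rw [pvBlocksLoop_acc]
    simp
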